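-- pv_equiv track=rewrite | github.com/ePinonIV/cs361l-homework-2 | question6/diagonal_matrix_sort.py | sort_matrix_diagonals
-- ===== SOURCE A (Python) =====
-- from collections import defaultdict
--
-- def sort_matrix_diagonals(mat):
--     """
--     Sorts each diagonal of an m x n matrix in ascending order.
--     """
--     if not mat or not mat[0]:
--         return mat
--
--     m, n = len(mat), len(mat[0])
--     diagonals = defaultdict(list)
--
--     # group by i-j formula
--     for i in range(m):
--         for j in range(n):
--             diagonals[i - j].append(mat[i][j])
--
--     # sort descending for O(1) popping from the end
--     for key in diagonals:
--         diagonals[key].sort(reverse=True)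
--
--     # replace by popping back into matrix
--     for i in range(m):
--         for j in range(n):
--             mat[i][j] = diagonals[i - j].pop()
--
--     return mat
-- ===== SOURCE B (Python) =====
-- def sort_matrix_diagonals(mat):
--     """
--     Sorts each diagonal of an m x n matrix in ascending order.
--     Walks each diagonal from its starting cell, sorts it, then rewrites
--     every cell directly from its diagonal's sorted list (position min(i, j)).
--     """
--     if not mat or not mat[0]:
--         return mat
--     m, n = len(mat), len(mat[0])
--     sorted_diags = {}
--     for k in range(1 - n, m):
--         i, j = max(k, 0), max(-k, 0)
--         vals = []
--         while i < m and j < n: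
--             vals.append(mat[i][j])
--             i += 1
--             j += 1
--         sorted_diags[k] = sorted(vals)
--     for i in range(m):
--         for j in range(n):
--             mat[i][j] = sorted_diags[i - j][min(i, j)]
--     return mat
-- ===== Notes on version B (the rewrite author's own statement) =====
-- stated objective: simpler
-- what changed: Replaces A's defaultdict grouping by i-j, per-key descending sort and pop-from-the-end write-back with a direct walk of each diagonal from its start cell, an ascending sort, and a direct write of sorted_diags[i-j][min(i,j)] into each cell.
import Mathlib
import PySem

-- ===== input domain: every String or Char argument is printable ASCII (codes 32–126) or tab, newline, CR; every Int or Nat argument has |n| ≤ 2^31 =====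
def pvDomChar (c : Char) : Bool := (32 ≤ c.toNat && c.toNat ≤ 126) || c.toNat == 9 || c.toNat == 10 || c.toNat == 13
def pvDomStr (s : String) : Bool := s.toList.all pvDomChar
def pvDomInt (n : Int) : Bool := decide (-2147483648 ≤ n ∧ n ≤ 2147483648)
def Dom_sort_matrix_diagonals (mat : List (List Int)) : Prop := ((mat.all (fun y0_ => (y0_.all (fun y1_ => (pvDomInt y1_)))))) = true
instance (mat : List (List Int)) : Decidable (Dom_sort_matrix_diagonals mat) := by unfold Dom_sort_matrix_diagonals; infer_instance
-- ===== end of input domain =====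

-- B replaces A's defaultdict grouping/reverse-sort/pop machinery by walking each diagonal
-- from its start cell and indexing its ascending-sorted list directly (objective: simpler).
-- Both Pythons mutate `mat` in place in the same way; the theorems are about the return value.

-- `mat[i][j] = v` (both Pythons assign only at 0 ≤ i < len(mat), j in range under Pre_)
def pySetCell (out : List (List Int)) (i j : Int) (v : Int) : List (List Int) :=
  out.modify i.toNat (fun row => row.set j.toNat v)

-- ===== PORT A =====
def sort_matrix_diagonals (mat : List (List Int)) : List (List Int) :=
  if mat = [] ∨ mat.headD [] = [] then mat
  else
    let m : Int := mat.length
    let n : Int := (mat.headD []).length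
    -- group by i-j formula (defaultdict append = Dict.modify with default [])
    let d1 : PySem.Dict Int (List Int) :=
      (PySem.List.pyRange 0 m 1).foldl (fun d i =>
        (PySem.List.pyRange 0 n 1).foldl (fun d j =>
          d.modify (i - j) [] (fun l => l ++ [PySem.List.pyGetD (PySem.List.pyGetD mat i []) j 0])) d)
        PySem.Dict.empty
    -- sort each diagonal descending, in place
    let d2 : PySem.Dict Int (List Int) :=
      d1.keys.foldl (fun d k => d.insert k (PySem.List.sorted (d.getD k []) (fun x => x) true)) d1
    -- replace by popping back into the matrix; `.pop()` raises on an empty list, which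
    -- never happens here: getLastD/dropLast are its value/effect on the nonempty list
    let r :=
      (PySem.List.pyRange 0 m 1).foldl (fun st i =>
        (PySem.List.pyRange 0 n 1).foldl (fun st j =>
          let l := st.1.getD (i - j) []
          (st.1.insert (i - j) l.dropLast, pySetCell st.2 i j (l.getLastD 0))) st)
        (d2, mat)
    r.2

-- ===== PORT B =====
-- the `while i < m and j < n` walk down one diagonal
def pvWalkDiag (mat : List (List Int)) (m n i j : Int) : List Int :=
  if h : i < m ∧ j < n then
    PySem.List.pyGetD (PySem.List.pyGetD mat i []) j 0 :: pvWalkDiag mat m n (i + 1) (j + 1)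
  else []
termination_by (m - i).toNat
decreasing_by omega

def sort_matrix_diagonals_alt (mat : List (List Int)) : List (List Int) :=
  if mat = [] ∨ mat.headD [] = [] then mat
  else
    let m : Int := mat.length
    let n : Int := (mat.headD []).length
    let sd : PySem.Dict Int (List Int) :=
      (PySem.List.pyRange (1 - n) m 1).foldl (fun d k =>
        d.insert k (PySem.List.sorted (pvWalkDiag mat m n (max k 0) (max (-k) 0)) (fun x => x) false))
        PySem.Dict.empty
    (PySem.List.pyRange 0 m 1).foldl (fun out i =>
      (PySem.List.pyRange 0 n 1).foldl (fun out j =>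
        pySetCell out i j (PySem.List.pyGetD (sd.getD (i - j) []) (min i j) 0)) out) mat

-- ===== PRECONDITION & SPEC =====
-- Pre_ excludes exactly the inputs on which the Python A raises IndexError:
-- some row shorter than row 0 (both A's mat[i][j] read and B's walk raise there).
def Pre_sort_matrix_diagonals (mat : List (List Int)) : Prop :=
  ∀ row ∈ mat, (mat.headD []).length ≤ row.length
instance (mat : List (List Int)) : Decidable (Pre_sort_matrix_diagonals mat) := by
  unfold Pre_sort_matrix_diagonals; infer_instance

def pvWitness_sort_matrix_diagonals : List (List Int) := [[3, 1], [2, 4]]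

def Spec_sort_matrix_diagonals (mat : List (List Int)) (out : List (List Int)) : Prop := out = sort_matrix_diagonals_alt mat
instance (mat : List (List Int)) (out : List (List Int)) : Decidable (Spec_sort_matrix_diagonals mat out) := by unfold Spec_sort_matrix_diagonals; infer_instance

-- ===== CLAIM (what is proved, stated in full; the proofs are below) =====
def Claim_equal_sort_matrix_diagonals : Prop := ∀ (mat : List (List Int)), Dom_sort_matrix_diagonals mat → Pre_sort_matrix_diagonals mat → Spec_sort_matrix_diagonals mat (sort_matrix_diagonals mat)

-- ===== LEMMAS AND PROOFS =====

-- reading cell (i, j) of the original matrix (both ports' composite read)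
def pvGc (mat : List (List Int)) (i j : Int) : Int :=
  PySem.List.pyGetD (PySem.List.pyGetD mat i []) j 0

-- length of diagonal k of an m × n grid
def pvDlen (m n k : Int) : Nat := (min m (k + n) - max k 0).toNat

-- diagonal k of the grid, top to bottom
def pvDiagL (mat : List (List Int)) (m n k : Int) : List Int :=
  (List.range (pvDlen m n k)).map (fun (t : Nat) => pvGc mat (max k 0 + (t : Int)) (max (-k) 0 + (t : Int)))

-- its ascending sort
def pvS (mat : List (List Int)) (m n k : Int) : List Int :=
  PySem.List.sorted (pvDiagL mat m n k) (fun x => x) false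

-- the value both programs end up writing at cell (i, j)
def pvW (mat : List (List Int)) (m n i j : Int) : Int :=
  PySem.List.pyGetD (pvS mat m n (i - j)) (min i j) 0

-- the common result: every cell rewritten, row-major
def pvTarget (mat : List (List Int)) (m n : Int) : List (List Int) :=
  (PySem.List.pyRange 0 m 1).foldl (fun out i =>
    (PySem.List.pyRange 0 n 1).foldl (fun out j =>
      pySetCell out i j (pvW mat m n i j)) out) mat

-- row-major cell list of the grid
def pvCells (m n : Int) : List (Int × Int) :=
  (PySem.List.pyRange 0 m 1).flatMap (fun i => (PySem.List.pyRange 0 n 1).map (fun j => (i, j)))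

-- number of cells on diagonal k strictly before cell (i, j) in row-major order
def pvC (n i j k : Int) : Nat :=
  (min i (k + n) - max k 0).toNat + (if i - j < k ∧ k ≤ i then 1 else 0)

-- ---------- generic fold lemmas ----------

theorem pv_nestfold {σ : Type} (L R : List Int) (step : σ → Int → Int → σ) (init : σ) :
    L.foldl (fun s i => R.foldl (fun s j => step s i j) s) init
      = (L.flatMap (fun i => R.map (fun j => (i, j)))).foldl (fun s p => step s p.1 p.2) init := by
  induction L generalizing init with
  | nil => rfl
  | cons a L ih =>
      simp only [List.flatMap_cons, List.foldl_cons, List.foldl_append, List.foldl_map, ih]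

theorem pv_getD_foldl_insert_fn (ks : List Int) (hnd : ks.Nodup)
    (g : Int → List Int) (d : PySem.Dict Int (List Int)) (k : Int) :
    (ks.foldl (fun d k => d.insert k (g k)) d).getD k []
      = if k ∈ ks then g k else d.getD k [] := by
  induction ks generalizing d with
  | nil => simp
  | cons a ks ih =>
      simp only [List.foldl_cons, List.nodup_cons] at *
      rw [ih hnd.2]
      by_cases hk : k ∈ ks
      · simp [hk]
      · by_cases hka : k = a
        · subst hka; simp [hk, PySem.Dict.getD_insert_self]
        · simp [hk, hka, PySem.Dict.getD_insert_of_ne _ _ _ hka]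

theorem pv_getD_foldl_insert_self (ks : List Int) (hnd : ks.Nodup)
    (f : List Int → List Int) (d : PySem.Dict Int (List Int)) (k : Int) :
    (ks.foldl (fun d k => d.insert k (f (d.getD k []))) d).getD k []
      = if k ∈ ks then f (d.getD k []) else d.getD k [] := by
  induction ks generalizing d with
  | nil => simp
  | cons a ks ih =>
      simp only [List.foldl_cons, List.nodup_cons] at *
      rw [ih hnd.2]
      by_cases hk : k ∈ ks
      · have hka : k ≠ a := fun h => hnd.1 (h ▸ hk)
        simp [hk, PySem.Dict.getD_insert_of_ne _ _ _ hka]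
      · by_cases hka : k = a
        · subst hka; simp [hk, PySem.Dict.getD_insert_self]
        · simp [hk, hka, PySem.Dict.getD_insert_of_ne _ _ _ hka]

-- descending sort is the reverse of ascending sort (Int values, identity key)
theorem pv_sorted_rev_eq_reverse (xs : List Int) :
    PySem.List.sorted xs (fun x => x) true = (PySem.List.sorted xs (fun x => x) false).reverse := by
  apply List.Perm.eq_of_pairwise (le := fun a b : Int => b ≤ a)
  · intro a b _ _ h1 h2; omega
  · exact PySem.List.sorted_pairwise_rev xs _
  · rw [List.pairwise_reverse]
    exact PySem.List.sorted_pairwise xs _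
  · exact ((PySem.List.sorted_perm xs _ _).trans ((PySem.List.sorted_perm xs _ _).symm)).trans
      (List.reverse_perm _).symm

-- ---------- B side ----------

theorem pv_walk_eq (mat : List (List Int)) (m n : Int) (i j : Int) :
    pvWalkDiag mat m n i j
      = (List.range (min (m - i) (n - j)).toNat).map (fun (t : Nat) => pvGc mat (i + (t : Int)) (j + (t : Int))) := by
  induction i, j using pvWalkDiag.induct (m := m) (n := n) with
  | case1 i j h ih =>
      rw [pvWalkDiag, dif_pos h]
      have hmin : (min (m - i) (n - j)).toNat = (min (m - (i+1)) (n - (j+1))).toNat + 1 := by omega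
      rw [hmin, List.range_succ_eq_map]
      rw [ih]
      refine congrArg₂ _ (by simp [pvGc]) ?_
      rw [List.map_map]
      apply List.map_congr_left
      intro t _
      simp only [Function.comp_apply, Nat.succ_eq_add_one]
      congr 1 <;> push_cast <;> ring
  | case2 i j h =>
      rw [pvWalkDiag, dif_neg h]
      have : (min (m - i) (n - j)).toNat = 0 := by omega
      simp [this]

theorem pv_walk_eq_diagL (mat : List (List Int)) (m n k : Int) :
    pvWalkDiag mat m n (max k 0) (max (-k) 0) = pvDiagL mat m n k := by
  rw [pv_walk_eq, pvDiagL, pvDlen]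
  have : (min (m - max k 0) (n - max (-k) 0)).toNat = (min m (k + n) - max k 0).toNat := by omega
  rw [this]

theorem pv_alt_eq_target (mat : List (List Int)) (h : ¬ (mat = [] ∨ mat.headD [] = [])) :
    sort_matrix_diagonals_alt mat = pvTarget mat mat.length (mat.headD []).length := by
  rw [sort_matrix_diagonals_alt, if_neg h, pvTarget]
  apply PySem.List.foldl_congr_mem
  intro acc i hi
  apply PySem.List.foldl_congr_mem
  intro acc2 j hj
  rw [PySem.List.mem_pyRange_one] at hi hj
  congr 1
  rw [pv_getD_foldl_insert_fn _ (PySem.List.nodup_pyRange_one _ _)]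
  rw [if_pos (by rw [PySem.List.mem_pyRange_one]; omega)]
  rw [pv_walk_eq_diagL]
  rfl

-- ---------- A side: phases 1 and 2 ----------

theorem pv_d1_getD (mat : List (List Int)) (m n : Int) (k : Int) :
    ((PySem.List.pyRange 0 m 1).foldl (fun d i =>
        (PySem.List.pyRange 0 n 1).foldl (fun d j =>
          d.modify (i - j) [] (fun l => l ++ [PySem.List.pyGetD (PySem.List.pyGetD mat i []) j 0])) d)
        (PySem.Dict.empty : PySem.Dict Int (List Int))).getD k []
      = ((pvCells m n).filter (fun p => p.1 - p.2 == k)).map (fun p => pvGc mat p.1 p.2) := by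
  have h1 : (List.foldl (fun d i => List.foldl (fun d j =>
        d.modify (i - j) [] fun l => l ++ [PySem.List.pyGetD (PySem.List.pyGetD mat i []) j 0]) d
        (PySem.List.pyRange 0 n 1)) (PySem.Dict.empty : PySem.Dict Int (List Int)) (PySem.List.pyRange 0 m 1))
      = (pvCells m n).foldl (fun d p => d.modify (p.1 - p.2) [] fun l => l ++ [pvGc mat p.1 p.2])
          PySem.Dict.empty :=
    pv_nestfold _ _ (fun (d : PySem.Dict Int (List Int)) i j => d.modify (i - j) [] fun l => l ++ [pvGc mat i j]) _
  rw [h1]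
  have hmap : (pvCells m n).foldl (fun d p => d.modify (p.1 - p.2) [] (fun l => l ++ [pvGc mat p.1 p.2]))
        (PySem.Dict.empty : PySem.Dict Int (List Int))
      = ((pvCells m n).map (fun p => (p.1 - p.2, pvGc mat p.1 p.2))).foldl
          (fun d q => d.modify q.1 [] (fun l => l ++ [q.2])) PySem.Dict.empty := by
    rw [List.foldl_map]
  rw [hmap, PySem.Dict.getD_foldl_modify_append]
  rw [List.filter_map, List.map_map]
  rfl

theorem pv_filter_pyRange_eq (a b v : Int) :
    (PySem.List.pyRange a b 1).filter (fun j => j == v) = if a ≤ v ∧ v < b then [v] else [] := by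
  rw [List.filter_beq]
  by_cases h : a ≤ v ∧ v < b
  · rw [if_pos h]
    have hm : v ∈ PySem.List.pyRange a b 1 := PySem.List.mem_pyRange_one.mpr h
    rw [List.count_eq_one_of_mem (PySem.List.nodup_pyRange_one a b) hm, List.replicate_one]
  · rw [if_neg h]
    have : v ∉ PySem.List.pyRange a b 1 := fun hv => h (PySem.List.mem_pyRange_one.mp hv)
    rw [List.count_eq_zero.mpr this, List.replicate_zero]

theorem pv_row_filter (m n k : Int) :
    (((PySem.List.pyRange 0 n 1).map (fun j => (m, j))).filter (fun p => p.1 - p.2 == k))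
      = if 0 ≤ m - k ∧ m - k < n then [(m, m - k)] else [] := by
  rw [List.filter_map]
  have hc : ((PySem.List.pyRange 0 n 1).filter ((fun (p : Int × Int) => p.1 - p.2 == k) ∘ (fun j => (m, j))))
      = (PySem.List.pyRange 0 n 1).filter (fun j => j == m - k) := by
    apply List.filter_congr
    intro j _
    simp only [Function.comp_apply]
    by_cases hj : j = m - k
    · subst hj; simp
    · have h2 : ¬ (m - j = k) := by omega
      simp [hj, h2]
  rw [hc, pv_filter_pyRange_eq]
  by_cases h : 0 ≤ m - k ∧ m - k < n
  · rw [if_pos h, if_pos h]; rfl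
  · rw [if_neg h, if_neg h]; rfl

theorem pv_diagL_succ (mat : List (List Int)) (n k m : Int) (hm : 0 ≤ m) :
    pvDiagL mat (m + 1) n k
      = pvDiagL mat m n k ++ (if 0 ≤ m - k ∧ m - k < n then [pvGc mat m (m - k)] else []) := by
  by_cases h : 0 ≤ m - k ∧ m - k < n
  · rw [if_pos h]
    have hd : pvDlen (m + 1) n k = pvDlen m n k + 1 := by unfold pvDlen; omega
    rw [pvDiagL, pvDiagL, hd, List.range_succ, List.map_append]
    congr 1
    simp only [List.map_cons, List.map_nil]
    have h1 : max k 0 + ((pvDlen m n k : Int)) = m := by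
      unfold pvDlen; omega
    have h2 : max (-k) 0 + ((pvDlen m n k : Int)) = m - k := by
      unfold pvDlen; omega
    rw [h1, h2]
  · rw [if_neg h]
    have hd : pvDlen (m + 1) n k = pvDlen m n k := by unfold pvDlen; omega
    rw [pvDiagL, pvDiagL, hd, List.append_nil]

theorem pv_diagF_eq_diagL (mat : List (List Int)) (n k : Int) (m : Int) (hm : 0 ≤ m) :
    ((pvCells m n).filter (fun p => p.1 - p.2 == k)).map (fun p => pvGc mat p.1 p.2)
      = pvDiagL mat m n k := by
  induction m, hm using Int.le_induction with
  | base =>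
      have : pvCells 0 n = [] := by
        rw [pvCells, show PySem.List.pyRange 0 0 1 = [] from PySem.List.pyRange_one_eq_nil (by omega)]
        rfl
      rw [this]
      have hd : pvDlen 0 n k = 0 := by unfold pvDlen; omega
      rw [pvDiagL, hd]
      rfl
  | succ m hm ih =>
      have hcells : pvCells (m + 1) n = pvCells m n ++ (PySem.List.pyRange 0 n 1).map (fun j => (m, j)) := by
        rw [pvCells, pvCells, PySem.List.pyRange_one_succ_right hm, List.flatMap_append]
        simp
      rw [hcells, List.filter_append, List.map_append, ih, pv_row_filter, pv_diagL_succ mat n k m hm]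
      congr 1
      by_cases h : 0 ≤ m - k ∧ m - k < n
      · rw [if_pos h, if_pos h]; rfl
      · rw [if_neg h, if_neg h]; rfl

-- ---------- A side: phase 3 ----------

theorem pv_c_zero (n k : Int) : pvC n 0 0 k = 0 := by
  unfold pvC; split_ifs <;> omega

theorem pv_getLastD_drop_rev (S : List Int) (c : Nat) :
    (((S.drop c).reverse).getLastD 0) = PySem.List.pyGetD S (c : Int) 0 := by
  rw [List.getLastD_eq_getLast?, List.getLast?_reverse, List.head?_drop,
    PySem.List.pyGetD_natCast, List.getD_eq_getElem?_getD]

theorem pv_phase3_inner (mat : List (List Int)) (m n : Int) (i : Int)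
    (hi0 : 0 ≤ i) :
    ∀ (fuel : Nat) (jj : Int), 0 ≤ jj → jj ≤ n → (n - jj).toNat = fuel →
    ∀ (d : PySem.Dict Int (List Int)) (out : List (List Int)),
    (∀ k, d.getD k [] = ((pvS mat m n k).drop (pvC n i jj k)).reverse) →
    (∀ k, ((PySem.List.pyRange jj n 1).foldl (fun st j =>
        let l := st.1.getD (i - j) []
        (st.1.insert (i - j) l.dropLast, pySetCell st.2 i j (l.getLastD 0))) (d, out)).1.getD k []
        = ((pvS mat m n k).drop (pvC n i n k)).reverse) ∧
    ((PySem.List.pyRange jj n 1).foldl (fun st j =>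
        let l := st.1.getD (i - j) []
        (st.1.insert (i - j) l.dropLast, pySetCell st.2 i j (l.getLastD 0))) (d, out)).2
      = (PySem.List.pyRange jj n 1).foldl (fun o j => pySetCell o i j (pvW mat m n i j)) out := by
  intro fuel
  induction fuel with
  | zero =>
      intro jj h0 hn hf d out hd
      have hjn : jj = n := by omega
      subst hjn
      rw [PySem.List.pyRange_one_eq_nil (by omega)]
      exact ⟨hd, rfl⟩
  | succ fuel ih =>
      intro jj h0 hn hf d out hd
      have hjlt : jj < n := by omega
      rw [PySem.List.pyRange_one_cons hjlt, List.foldl_cons, List.foldl_cons]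
      have hc0 : pvC n i jj (i - jj) = (min i jj).toNat := by unfold pvC; split_ifs <;> omega
      have hval : ((d.getD (i - jj) []).getLastD 0) = pvW mat m n i jj := by
        rw [hd, hc0, pvW]
        rw [pv_getLastD_drop_rev]
        congr 1
        omega
      have hdrop : ((d.getD (i - jj) []).dropLast) = ((pvS mat m n (i - jj)).drop (pvC n i (jj + 1) (i - jj))).reverse := by
        rw [hd, List.dropLast_reverse, List.tail_drop]
        congr 2
        unfold pvC; split_ifs <;> omega
      have hd' : ∀ k, ((d.insert (i - jj) ((d.getD (i - jj) []).dropLast)).getD k [])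
          = ((pvS mat m n k).drop (pvC n i (jj + 1) k)).reverse := by
        intro k
        rw [PySem.Dict.getD_insert]
        by_cases hk : k = i - jj
        · rw [if_pos hk, hk, hdrop]
        · rw [if_neg hk, hd]
          congr 2
          unfold pvC
          split_ifs <;> omega
      have := ih (jj + 1) (by omega) (by omega) (by omega)
        (d.insert (i - jj) ((d.getD (i - jj) []).dropLast))
        (pySetCell out i jj ((d.getD (i - jj) []).getLastD 0)) hd'
      refine ⟨this.1, ?_⟩
      rw [this.2, hval]

theorem pv_phase3_outer (mat : List (List Int)) (m n : Int) (hn : 1 ≤ n) :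
    ∀ (fuel : Nat) (ii : Int), 0 ≤ ii → (m - ii).toNat = fuel →
    ∀ (d : PySem.Dict Int (List Int)) (out : List (List Int)),
    (∀ k, d.getD k [] = ((pvS mat m n k).drop (pvC n ii 0 k)).reverse) →
    ((PySem.List.pyRange ii m 1).foldl (fun st i =>
        (PySem.List.pyRange 0 n 1).foldl (fun st j =>
          let l := st.1.getD (i - j) []
          (st.1.insert (i - j) l.dropLast, pySetCell st.2 i j (l.getLastD 0))) st) (d, out)).2
      = (PySem.List.pyRange ii m 1).foldl (fun o i =>
          (PySem.List.pyRange 0 n 1).foldl (fun o j => pySetCell o i j (pvW mat m n i j)) o) out := by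
  intro fuel
  induction fuel with
  | zero =>
      intro ii h0 hf d out hd
      rw [show PySem.List.pyRange ii m 1 = [] from PySem.List.pyRange_one_eq_nil (by omega)]
      rfl
  | succ fuel ih =>
      intro ii h0 hf d out hd
      have hlt : ii < m := by omega
      rw [PySem.List.pyRange_one_cons hlt, List.foldl_cons, List.foldl_cons]
      have hinner := pv_phase3_inner mat m n ii h0 n.toNat 0 (by omega) (by omega) (by omega) d out hd
      have hstep : ((PySem.List.pyRange 0 n 1).foldl (fun st j =>
          let l := st.1.getD (ii - j) []
          (st.1.insert (ii - j) l.dropLast, pySetCell st.2 ii j (l.getLastD 0))) (d, out))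
          = (((PySem.List.pyRange 0 n 1).foldl (fun st j =>
          let l := st.1.getD (ii - j) []
          (st.1.insert (ii - j) l.dropLast, pySetCell st.2 ii j (l.getLastD 0))) (d, out)).1,
          ((PySem.List.pyRange 0 n 1).foldl (fun st j =>
          let l := st.1.getD (ii - j) []
          (st.1.insert (ii - j) l.dropLast, pySetCell st.2 ii j (l.getLastD 0))) (d, out)).2) := rfl
  
      rw [hstep]
      rw [ih (ii + 1) (by omega) (by omega) _ _ ?inv]
      case inv =>
        intro k
        rw [hinner.1]
        congr 2
        unfold pvC
        split_ifs <;> omega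
      rw [hinner.2]

theorem pv_a_eq_target (mat : List (List Int)) (h : ¬ (mat = [] ∨ mat.headD [] = [])) :
    sort_matrix_diagonals mat = pvTarget mat mat.length (mat.headD []).length := by
  have hn0 : mat.headD [] ≠ [] := fun hh => h (Or.inr hh)
  have hn : (1 : Int) ≤ ((mat.headD []).length : Int) := by
    have := List.length_pos_iff.mpr hn0
    omega
  unfold sort_matrix_diagonals
  rw [if_neg h]
  dsimp only
  set m : Int := (mat.length : Int) with hm
  set n : Int := ((mat.headD []).length : Int) with hnn
  set d1 := (PySem.List.pyRange 0 m 1).foldl (fun d i =>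
      (PySem.List.pyRange 0 n 1).foldl (fun d j =>
        d.modify (i - j) [] (fun l => l ++ [PySem.List.pyGetD (PySem.List.pyGetD mat i []) j 0])) d)
      (PySem.Dict.empty : PySem.Dict Int (List Int)) with hd1
  have hflat : d1 = (pvCells m n).foldl
      (fun d p => d.modify (p.1 - p.2) [] (fun l => l ++ [pvGc mat p.1 p.2])) PySem.Dict.empty := by
    rw [hd1]
    exact pv_nestfold _ _ (fun (d : PySem.Dict Int (List Int)) i j =>
      d.modify (i - j) [] fun l => l ++ [pvGc mat i j]) _
  have hnodup : d1.keys.Nodup := by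
    rw [hflat]
    exact PySem.Dict.nodup_keys_foldl_modify_key _ _ _ _ _ (by simp)
  have hd1getD : ∀ k, d1.getD k [] = pvDiagL mat m n k := by
    intro k
    rw [hd1, pv_d1_getD, pv_diagF_eq_diagL mat n k m (by omega)]
  have hd2 : ∀ k, (d1.keys.foldl (fun d k => d.insert k (PySem.List.sorted (d.getD k []) (fun x => x) true)) d1).getD k []
      = ((pvS mat m n k).drop (pvC n 0 0 k)).reverse := by
    intro k
    rw [pv_getD_foldl_insert_self _ hnodup (fun l => PySem.List.sorted l (fun x => x) true) d1 k]
    rw [pv_c_zero, List.drop_zero, pvS, ← pv_sorted_rev_eq_reverse]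
    by_cases hk : k ∈ d1.keys
    · rw [if_pos hk, hd1getD]
    · rw [if_neg hk, hd1getD]
      have hcon : d1.contains k = false := by
        by_contra hc
        exact hk ((PySem.Dict.contains_iff_mem_keys d1 k).mp (by revert hc; cases d1.contains k <;> simp))
      have : d1.getD k [] = [] := PySem.Dict.getD_of_not_contains _ _ hcon
      rw [hd1getD] at this
      rw [this]
      rfl
  exact pv_phase3_outer mat m n hn m.toNat 0 (by omega) (by omega) _ mat hd2

-- ===== VERDICT (by name: the statement is the Claim_ definition above) =====
theorem sort_matrix_diagonals_spec : Claim_equal_sort_matrix_diagonals := by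
  intro mat _ _
  unfold Spec_sort_matrix_diagonals
  by_cases h : mat = [] ∨ mat.headD [] = []
  · unfold sort_matrix_diagonals sort_matrix_diagonals_alt
    simp only [if_pos h]
  · rw [pv_a_eq_target mat h, pv_alt_eq_target mat h]
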